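-- pv_equiv track=rewrite | github.com/qq10086-jones/AIagent_project_260213 | worker-quant/quant_trading/Project_optimized/report_utils.py | find_symbol_variants
-- ===== SOURCE A (Python) =====
-- from typing import Iterable
--
-- def _base_symbol(symbol: str) -> str:
--     s = (symbol or "").strip()
--     if s.endswith(".T"):
--         return s[:-2]
--     return s
--
-- def find_symbol_variants(symbols: Iterable[str]) -> dict[str, set[str]]:
--     variants: dict[str, set[str]] = {}
--     for s in symbols:
--         if not s:
--             continue
--         base = _base_symbol(s)
--         variants.setdefault(base, set()).add(s)
--     return variants
-- ===== SOURCE B (Python) =====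
-- def _base_symbol(symbol: str) -> str:
--     s = (symbol or "").strip()
--     if s.endswith(".T"):
--         return s[:-2]
--     return s
--
-- def find_symbol_variants(symbols):
--     syms = [s for s in symbols if s]
--     bases = list(dict.fromkeys(_base_symbol(s) for s in syms))
--     return {b: {s for s in syms if _base_symbol(s) == b} for b in bases}
-- ===== Notes on version B (the rewrite author's own statement) =====
-- stated objective: alternative
-- what changed: Replaces the incremental setdefault-dict accumulation with a two-phase plan: first compute the ordered distinct base keys via dict.fromkeys, then build the result by a comprehension that collects each group with a per-base filter pass over the pre-filtered symbol list; this trades A's single hash-indexed pass for one scan per distinct base, so B is slower on large inputs.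
import Mathlib
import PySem

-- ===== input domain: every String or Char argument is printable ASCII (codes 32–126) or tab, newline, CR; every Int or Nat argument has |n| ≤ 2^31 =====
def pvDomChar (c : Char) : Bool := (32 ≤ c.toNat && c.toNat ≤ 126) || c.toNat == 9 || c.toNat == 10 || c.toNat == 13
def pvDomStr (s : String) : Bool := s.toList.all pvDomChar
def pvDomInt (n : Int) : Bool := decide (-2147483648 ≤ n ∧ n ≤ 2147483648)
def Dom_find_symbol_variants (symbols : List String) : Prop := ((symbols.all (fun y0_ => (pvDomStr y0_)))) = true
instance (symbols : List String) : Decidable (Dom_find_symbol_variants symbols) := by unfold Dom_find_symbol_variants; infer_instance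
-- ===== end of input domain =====

-- B replaces A's incremental setdefault-dict accumulation by a two-phase plan (ordered distinct
-- base keys first, then one filter pass per base); alternative decomposition, same results.


-- ===== PORT A =====
-- helper _base_symbol, shared by both Pythons: strip, drop a trailing ".T"
def baseSymbol (symbol : String) : String :=
  let s := PySem.Str.strip (if symbol = "" then "" else symbol)  -- (symbol or "")
  if PySem.Str.endswith s ".T" then PySem.Str.slice s none (some (-2)) else s

def find_symbol_variants (symbols : List String) : List (String × List String) :=
  (symbols.foldl
    (fun variants s =>
      if s = "" then variants
      else PySem.Dict.modify variants (baseSymbol s) PySem.Set.empty (fun st => PySem.Set.add st s))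
    PySem.Dict.empty).items

-- ===== PORT B =====
def find_symbol_variants_alt (symbols : List String) : List (String × List String) :=
  let syms := symbols.filter (fun s => !(s = ""))
  let bases := PySem.List.dedup (syms.map baseSymbol)
  bases.map (fun b => (b, PySem.Set.ofList (syms.filter (fun s => baseSymbol s = b))))

-- ===== PRECONDITION & SPEC =====
def Spec_find_symbol_variants (symbols : List String) (out : List (String × List String)) : Prop := out = find_symbol_variants_alt symbols
instance (symbols : List String) (out : List (String × List String)) : Decidable (Spec_find_symbol_variants symbols out) := by unfold Spec_find_symbol_variants; infer_instance

-- ===== CLAIM (what is proved, stated in full; the proofs are below) =====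
def Claim_equal_find_symbol_variants : Prop := ∀ (symbols : List String), Dom_find_symbol_variants symbols → Spec_find_symbol_variants symbols (find_symbol_variants symbols)

-- ===== LEMMAS AND PROOFS =====

-- helper abbreviations for the proof (proof-only; below the claim block)
def pvStep (d : PySem.Dict String (List String)) (s : String) : PySem.Dict String (List String) :=
  if s = "" then d
  else PySem.Dict.modify d (baseSymbol s) PySem.Set.empty (fun st => PySem.Set.add st s)

def pvSyms (xs : List String) : List String := xs.filter (fun s => !(s = ""))

def pvColl (xs : List String) (b : String) : List String :=
  PySem.Set.ofList ((pvSyms xs).filter (fun s => baseSymbol s = b))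

def pvBases (xs : List String) : List String :=
  PySem.List.dedup ((pvSyms xs).map baseSymbol)

-- dedup of a snoc
theorem pv_dedup_snoc (l : List String) (x : String) :
    PySem.List.dedup (l ++ [x]) =
      if x ∈ PySem.List.dedup l then PySem.List.dedup l else PySem.List.dedup l ++ [x] := by
  simp [PySem.List.dedup_eq_ofList, PySem.Set.ofList, PySem.Set.add]

-- Set.ofList of a snoc
theorem pv_ofList_snoc (l : List String) (x : String) :
    PySem.Set.ofList (l ++ [x]) =
      if x ∈ PySem.Set.ofList l then PySem.Set.ofList l else PySem.Set.ofList l ++ [x] := by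
  simp [PySem.Set.ofList, PySem.Set.add]

-- Set.add by membership
theorem pv_add_eq (s : List String) (y : String) :
    PySem.Set.add s y = if y ∈ s then s else s ++ [y] := by
  simp [PySem.Set.add]

-- find? by equality on a list containing the key
theorem pv_find?_beq_of_mem (l : List String) (k : String) (h : k ∈ l) :
    List.find? (fun b => b == k) l = some k := by
  induction l with
  | nil => simp at h
  | cons a t ih =>
    rcases List.mem_cons.1 h with rfl | hm
    · simp
    · by_cases hak : a = k
      · subst hak; simp
      · rw [List.find?_cons_of_neg (by simp [hak])]
        exact ih hm

-- what A's setdefault-and-add step does to a dict of the invariant shape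
theorem pv_items_modify (d : PySem.Dict String (List String)) (bases : List String)
    (c : String → List String) (hd : d.items = bases.map (fun b => (b, c b)))
    (k y : String) :
    (PySem.Dict.modify d k PySem.Set.empty (fun st => PySem.Set.add st y)).items =
      if k ∈ bases then
        bases.map (fun b => if b = k then (k, PySem.Set.add (c k) y) else (b, c b))
      else bases.map (fun b => (b, c b)) ++ [(k, [y])] := by
  by_cases hk : k ∈ bases
  · have hcont : d.contains k = true := by
      simp only [PySem.Dict.contains, hd, List.any_eq_true]
      exact ⟨(k, c k), List.mem_map_of_mem hk, by simp⟩
    have hgetD : d.getD k PySem.Set.empty = c k := by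
      simp only [PySem.Dict.getD, PySem.Dict.get?, hd, List.find?_map]
      have h2 : (fun (p : String × List String) => p.1 == k) ∘ (fun b => (b, c b))
          = fun b => b == k := rfl
      rw [h2, pv_find?_beq_of_mem _ _ hk]
      rfl
    simp only [PySem.Dict.modify, hgetD, PySem.Dict.insert, hcont, if_true, hd,
      List.map_map, hk]
    apply List.map_congr_left
    intro b hb
    by_cases hbk : b = k
    · subst hbk
      simp
    · simp [Function.comp_apply, hbk]
  · have hcont : d.contains k = false := by
      simp only [PySem.Dict.contains, hd, List.any_map, List.any_eq_false,
        Function.comp_apply, beq_iff_eq]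
      intro b hb h
      subst h
      exact hk hb
    have hgetD : d.getD k PySem.Set.empty = [] := by
      simp only [PySem.Dict.getD, PySem.Dict.get?, hd, List.find?_map]
      have h2 : (fun (p : String × List String) => p.1 == k) ∘ (fun b => (b, c b))
          = fun b => b == k := rfl
      rw [h2, List.find?_eq_none.2 (fun b hb => by
        simp only [beq_iff_eq]
        intro h; subst h; exact hk hb)]
      rfl
    simp only [PySem.Dict.modify, hgetD, PySem.Dict.insert, hcont, Bool.false_eq_true,
      if_false, hd, hk]
    rfl

set_option maxHeartbeats 1600000 in
-- the invariant: A's accumulated dict, as a list, is B's map over the deduped bases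
theorem pv_inv (xs : List String) :
    (xs.foldl pvStep PySem.Dict.empty).items
      = (pvBases xs).map (fun b => (b, pvColl xs b)) := by
  induction xs using List.reverseRecOn with
  | nil => rfl
  | append_singleton xs y ih =>
    rw [List.foldl_append, List.foldl_cons, List.foldl_nil]
    by_cases hy : y = ""
    · subst hy
      have hsy : pvSyms (xs ++ [""]) = pvSyms xs := by
        simp [pvSyms, List.filter_append]
      show (pvStep (xs.foldl pvStep PySem.Dict.empty) "").items = _
      simp only [pvStep, if_true, pvBases, pvColl, hsy]
      simpa only [pvBases, pvColl] using ih
    · -- y survives the filter; its base key is baseSymbol y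
      have hsy : pvSyms (xs ++ [y]) = pvSyms xs ++ [y] := by
        simp [pvSyms, List.filter_append, hy]
      have hbases : pvBases (xs ++ [y])
          = if baseSymbol y ∈ pvBases xs then pvBases xs else pvBases xs ++ [baseSymbol y] := by
        simp only [pvBases]
        rw [show (pvSyms (xs ++ [y])).map baseSymbol
            = (pvSyms xs).map baseSymbol ++ [baseSymbol y] by rw [hsy]; simp,
          pv_dedup_snoc]
      have hcoll : ∀ b, pvColl (xs ++ [y]) b
          = if baseSymbol y = b then (if y ∈ pvColl xs b then pvColl xs b else pvColl xs b ++ [y])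
            else pvColl xs b := by
        intro b
        simp only [pvColl, hsy, List.filter_append]
        by_cases hb : baseSymbol y = b
        · have h1 : List.filter (fun s => decide (baseSymbol s = b)) [y] = [y] := by simp [hb]
          rw [h1, pv_ofList_snoc]
          simp only [hb, if_true]
        · have h1 : List.filter (fun s => decide (baseSymbol s = b)) [y] = [] := by simp [hb]
          rw [h1, List.append_nil]
          simp only [hb, if_false]
      have hstep : pvStep (xs.foldl pvStep PySem.Dict.empty) y
          = PySem.Dict.modify (xs.foldl pvStep PySem.Dict.empty) (baseSymbol y)
              PySem.Set.empty (fun st => PySem.Set.add st y) := by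
        simp only [pvStep, hy, if_false]
      rw [hstep, pv_items_modify _ _ _ ih, hbases]
      by_cases hk : baseSymbol y ∈ pvBases xs
      · simp only [hk, if_true]
        apply List.map_congr_left
        intro b hb
        rw [hcoll b]
        by_cases hbk : b = baseSymbol y
        · subst hbk
          simp [pv_add_eq]
        · have hbk' : ¬ baseSymbol y = b := fun h => hbk h.symm
          simp only [hbk, hbk', if_false]
      · simp only [hk, if_false, List.map_append]
        congr 1
        · apply List.map_congr_left
          intro b hb
          rw [hcoll b]
          have hbk' : ¬ baseSymbol y = b := fun h => hk (h ▸ hb)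
          simp only [hbk', if_false]
        · have hknotmap : baseSymbol y ∉ (pvSyms xs).map baseSymbol := by
            intro h
            exact hk (by simpa [pvBases, PySem.List.dedup_eq_ofList, PySem.Set.mem_ofList] using h)
          have hempty : pvColl xs (baseSymbol y) = [] := by
            simp only [pvColl]
            rw [show (pvSyms xs).filter (fun s => decide (baseSymbol s = baseSymbol y)) = []
              from List.filter_eq_nil_iff.2 (fun s hs => by
                simp only [decide_eq_true_eq]
                intro h
                exact hknotmap (h ▸ List.mem_map_of_mem hs))]
            rfl
          rw [List.map_cons, List.map_nil, hcoll (baseSymbol y), hempty]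
          simp

-- ===== VERDICT (by name: the statement is the Claim_ definition above) =====
theorem find_symbol_variants_spec : Claim_equal_find_symbol_variants := by
  intro symbols _
  unfold Spec_find_symbol_variants
  show find_symbol_variants symbols = _
  rw [find_symbol_variants]
  have h1 : symbols.foldl
      (fun variants s =>
        if s = "" then variants
        else PySem.Dict.modify variants (baseSymbol s) PySem.Set.empty (fun st => PySem.Set.add st s))
      PySem.Dict.empty = symbols.foldl pvStep PySem.Dict.empty := rfl
  rw [h1, pv_inv]
  rfl
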